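/- GENERATED by mk_final_copies.py from the proof of the farm's unit `start_decoder.R12c` (farm:start_decoder.R12c.1: Proof.lean) as the
   re-elaboration sweep compiled it — do not edit. -/
import Asan.CheckWalk
import Vorbis.Spec.Reader
import Vorbis.Spec.Units.start_decoder_R12c

open X86 X86.User Asan Vorbis Vorbis.Spec Vorbis.Spec.StartDecoder

set_option maxRecDepth 4000
set_option maxHeartbeats 4000000

namespace Vorbis.Spec.start_decoder_R12c

/-- **Segment R12c of `start_decoder`** (`cut306` 0x11649c … 0x1164c2, returns into `cut307` 0x1164c7; stb_vorbis_fixed.c 4134 – 4135):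
the spill of eax to `[R + 18H]`, `r12 = j` (`movsxd r12, r13d`, j < 16), `r15 = m + 11H + j`, the store1 check of that address
(`MapLoop.site_record`: a byte of the record under construction, inside the mapping table), `submap_floor[j] = byte [R + 18H]`, the
third `get_bits(f, 8)`. The loop record by `MapLoop.carry` (windows: the stack below the steady rsp, the spill slot, the byte of the
record, the reader's fields of `*f`: each a `MapWin`); `Bits` at the call from `bits_kept` (no store into `*f`), after it from the
reader's post; the own clauses of `InR12` as in R12b — `MapCur.carry` (the head `[m, m + 11H)` of the record is below the stored
byte; the `chan` block, allocated since the head of the iteration, is disjoint from the mapping table), the prefix of MP6 (the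
bytes `m + 11H + s`, `m + 21H + s`, s < j < 16, are not the stored byte). -/
theorem segR12c_walk {Lay : Layout} (hLay : Lay.hi = 0x1000000) {μ : Microarch} (hμ : UserX.MicroOK μ) {u₀ : State}
    (hcode : HasCodeNat Lay u₀ Vorbis.L.start_decoder.entry Vorbis.Code.code_start_decoder.nat Vorbis.L.start_decoder.size)
    (h_get_bits : ∀ (others : List Obj) (frames : List (Nat × FrameLayout)) (Blk : Block → Prop) (len : Nat),
      Calls Lay μ Vorbis.WayInv (Vorbis.conv u₀) Vorbis.L.get_bits.entry (Vorbis.Spec.get_bits.spec others frames Blk len))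
    (h_store1 : Asan.SmallCheck Lay μ Vorbis.WayInv (Vorbis.CodeOK u₀) [.rax, .rdx] 1 Vorbis.L.__asan_store1_noabort.entry)
    {g : Ghost} {i j : Nat} {v : State} {A7 A7c Ai : Arena} {A : Arena × List Obj}
    (hb : BodyR12m u₀ g Vorbis.L.start_decoder.cut306 i j A7 A7c Ai A v) :
    ReachVia Lay μ WayInv v (fun w => AtR12c u₀ g i j w) := by
  have hpt := hb.pt
  have hl := hpt.loop
  have hcur := hpt.cur
  have hfr := hl.frame
  have hh := hl.hand
  have hm := hl.mid
  have hp : Pos g A := hl.secPt.pos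
  have he := hfr.entry
  v_entry he
  obtain ⟨hRa, hR8⟩ := hfr.r_eq
  simp only [steady, Ghost.RA] at hRa
  simp only [depth] at he_room he_stack
  have hflo := hp.f_lo
  have hf2 := hp.f_hi
  have hf3 := hp.f_stack
  simp only [Ghost.RA] at hf3
  have hRn : (addr g.R).toNat = g.R := toNat_addr _ (by omega)
  have hfn : (addr g.f).toNat = g.f := toNat_addr _ (by omega)
  -- the record `m(i)` lies in the mapping table, inside the arena's buffer
  obtain ⟨htab, hT1, hT2⟩ := hl.table
  have h1 := hl.maps.MP1
  have hlt := hcur.lt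
  have p9 := hp.ar_lo
  have p10 := hp.ar_hi
  have p11 := hp.ar_stack
  have p7 := hp.objOut
  have hAT : 1154368 ≤ A.1.B := hh.arenaText
  have em : mapAt g v.mem i = stb_vorbis.mapping v.mem g.f + 56 * i := rfl
  have h3 := hcur.MP3
  have hjlt := hb.j_lt
  have hj16 : j < 16 := by omega
  obtain ⟨m, hmdef⟩ : ∃ m, mapAt g v.mem i = m := ⟨_, rfl⟩
  rw [hmdef] at em
  have hmn : (addr m).toNat = m := toNat_addr _ (by omega)
  have hjn : (addr j).toNat = j := toNat_addr _ (by omega)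
  have hsx : Word.ofBV (BitVec.signExtend 64 (Word.part .w32 (addr j))) = addr j := cnt32_sext j (by omega)
  have w_rip := hfr.rip
  have c_rsp := hfr.rsp
  have c_rbp := hl.rbp
  have c_rbx : v.reg .rbx = addr m := by
    rw [← hmdef]
    exact hpt.rbx
  have c_r13 := hpt.r13
  have w_eq : Mem.EqOn Vorbis.L.textLo Vorbis.L.textHi u₀.mem v.mem := hfr.code
  have hdf : v.flags .df = false := (show abiInv _ from hfr.inv).1
  have hmx : v.mxcsr &&& 0x1F80 = 0x1F80 := (show abiInv _ from hfr.inv).2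
  have hsse := Vorbis.sseOK_of_abiInv hfr.inv
  have hgb := h_get_bits A.2 g.frames' (g.Blk A) g.len
  u_walk hcode [hμ.vendor, hsx] until [Vorbis.L.start_decoder.cut307] span [Vorbis.L.textLo, Vorbis.L.textHi] side (v_side)
  case check_1164ab =>
    -- 0x1164ab: the store1 check of `m->submap_floor[j]`, the byte `m + 11H + j` of the record under construction
    have hun : ShadowUntouched v.mem s_1164ab.mem := by v_untouched
    have hsite := hl.site_record hcur.lt (0x11 + j) 1 (by omega) (by omega)
    rw [hmdef] at hsite
    exact Vorbis.Spec.check_site hfr.shadow hun hsite (by u_omega)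
  case call_inv => v_inv
  case pre_1164c2 =>
    have hun : ShadowUntouched v.mem s_1164c2.mem := by v_untouched
    have hs0 : Mem.SameExcept [⟨g.R - 8, g.R⟩, ⟨g.R + 24, g.R + 28⟩, ⟨m + 17 + j, m + 18 + j⟩] v.mem s_1164c2.mem := by
      u_same
    have hbits : Bits (g.Blk A) g.len s_1164c2.mem g.f := by
      apply bits_kept hp hm.bits hs0
      intro w hw
      simp only [List.mem_cons, List.mem_nil_iff, or_false] at hw
      rcases hw with rfl | rfl | rfl
      · left
        simp only []
        omega
      · left
        simp only []
        omega
      · right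
        left
        simp only []
        omega
    refine ⟨⟨shadowPre_call hfr (by rw [w_rsp]; u_omega) hun, ?_, ?_⟩, ?_⟩
    · rw [w_rdi, hfn]
      exact readerEnv_mid hh hm
    · rw [w_rdi, hfn]
      exact hbits
    · rw [bitsArg_def, w_rsi]
      decide
  -- the returned state (0x1164c7)
  v_after_call w_rsp_1164c2 w_mem_1164c2
  simp only [w_rdi_1164c2, hfn] at w_same
  have hs : Mem.SameExcept [⟨g.R - 360, g.R⟩, ⟨g.R + 24, g.R + 28⟩, ⟨m + 17 + j, m + 18 + j⟩, ⟨g.f + 48, g.f + 56⟩,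
      ⟨g.f + 84, g.f + 96⟩, ⟨g.f + 136, g.f + 144⟩, ⟨g.f + 1484, g.f + 1749⟩, ⟨g.f + 1752, g.f + 1784⟩]
      v.mem s_1164c2r.mem := by
    u_same
  have hws : ∀ w, w ∈ [(⟨g.R - 360, g.R⟩ : Span), ⟨g.R + 24, g.R + 28⟩, ⟨m + 17 + j, m + 18 + j⟩, ⟨g.f + 48, g.f + 56⟩,
      ⟨g.f + 84, g.f + 96⟩, ⟨g.f + 136, g.f + 144⟩, ⟨g.f + 1484, g.f + 1749⟩, ⟨g.f + 1752, g.f + 1784⟩] →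
      MapWin g Ai A (mapAt g v.mem i) w := by
    intro w hw
    simp only [List.mem_cons, List.mem_nil_iff, or_false] at hw
    rw [hmdef]
    unfold MapWin
    rcases hw with rfl | rfl | rfl | rfl | rfl | rfl | rfl | rfl
    · left
      simp only []
      omega
    · right; left
      simp only []
      omega
    · right; right; right; right; right; right; right; right; right; left
      simp only []
      omega
    · right; right; right; right; left
      simp only []
      omega
    · right; right; right; right; left
      simp only []
      omega
    · right; right; right; right; right; left
      simp only []
      omega
    · right; right; right; right; right; right; left
      simp only []
      omega
    · right; right; right; right; right; right; right; left
      simp only []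
      omega
  have hpost : GetBitsSpecPost (g.Blk A) g.len (s_1164c2.reg .rdi).toNat (bitsArg s_1164c2) s_1164c2 s_1164c2r := w_post
  rw [w_rdi_1164c2, hfn] at hpost
  have hun : ShadowUntouched v.mem s_1164c2r.mem := by v_untouched
  have hl' : MapLoop u₀ g Vorbis.L.start_decoder.cut307 i A7 A7c Ai A s_1164c2r :=
    hl.carry hcur.lt hs hun hws hpost.bits.bits w_rip w_rsp (Vorbis.conv_code_eqOn w_code) w_inv (by rw [w_kept.get .rbp rfl])
  obtain ⟨ecount, _, emap, echn, _⟩ := hl.fields_eq hcur.lt hs hws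
  have hobj := hl.objEq hcur.lt hs hws
  rw [hmdef] at emap
  -- a range inside the arena's buffer that misses the stored byte `m + 11H + j` reads the same
  have harena : ∀ lo hi : Nat, A.1.B ≤ lo → hi ≤ A.1.B + A.1.L → (hi ≤ m + 17 + j ∨ m + 18 + j ≤ lo) →
      Mem.EqOn lo hi v.mem s_1164c2r.mem := by
    intro lo hi q1 q2 q3
    apply hs.eqOn
    intro w hw
    simp only [List.mem_cons, List.mem_nil_iff, or_false] at hw
    rcases hw with rfl | rfl | rfl | rfl | rfl | rfl | rfl | rfl <;> simp only [] <;> omega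
  -- the head of the record `[m, m + 11H)` is below the stored byte
  have hrec : Mem.EqOn m (m + 0x11) v.mem s_1164c2r.mem :=
    harena _ _ (by omega) (by omega) (by omega)
  -- the `chan` block, allocated since the head of the iteration, is disjoint from the mapping table (a block of `A7c`)
  have hC : Since Ai A.1 ⟨Mapping.chan v.mem (mapAt g v.mem i), Off.sizeof.MappingChannel * nchan v.mem g.f⟩ := hcur.MP2
  have hCin := arena_inside hm.arena hC.1
  have hCd := hm.arena.old_disjoint_since hl.maps.exti (htab.mono hl.maps.ext7c) hC
  simp only [vblock] at hCd
  simp only [] at hCin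
  have hchan : (Block.mk (Mapping.chan v.mem (mapAt g v.mem i)) (Off.sizeof.MappingChannel * nchan v.mem g.f)).Kept
      v.mem s_1164c2r.mem := by
    apply Block.Kept.of_sameExcept hs
    · intro w hw
      simp only [List.mem_cons, List.mem_nil_iff, or_false] at hw
      rcases hw with rfl | rfl | rfl | rfl | rfl | rfl | rfl | rfl <;> simp only [] <;> omega
    · simp only []
      omega
  have hcur' : MapCur g (Since Ai A.1) s_1164c2r.mem i 12 := by
    refine hcur.carry ecount (emap.trans hmdef.symm) echn ?_ ?_ (fun _ => hchan)
    · rw [hmdef]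
      exact hrec
    · rw [hmdef]
      omega
  have e_sub : Mapping.submaps s_1164c2r.mem m = Mapping.submaps v.mem m := by
    simp only [vacc, voff]
    exact hrec.u8 _ (by omega) (by omega) (by omega)
  rw [hmdef] at hjlt
  have hold_done := hpt.done
  rw [hmdef] at hold_done
  have hdone : ∀ s : Nat, s < j → Mapping.SubmapOK s_1164c2r.mem g.f (mapAt g s_1164c2r.mem i) s := by
    intro s hs'
    rw [emap]
    have hold := hold_done s hs'
    -- the bytes of the finished submaps lie below / are not the stored byte
    have hfl : Mem.EqOn (m + 17 + s) (m + 18 + s) v.mem s_1164c2r.mem :=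
      harena _ _ (by omega) (by omega) (by omega)
    have hrs : Mem.EqOn (m + 33 + s) (m + 34 + s) v.mem s_1164c2r.mem :=
      harena _ _ (by omega) (by omega) (by omega)
    have ef : Mapping.submap_floor s_1164c2r.mem m s = Mapping.submap_floor v.mem m s := by
      simp only [vacc, voff]
      exact hfl.u8 _ (by omega) (by omega) (by omega)
    have er : Mapping.submap_residue s_1164c2r.mem m s = Mapping.submap_residue v.mem m s := by
      simp only [vacc, voff]
      exact hrs.u8 _ (by omega) (by omega) (by omega)
    have efc : stb_vorbis.floor_count s_1164c2r.mem g.f = stb_vorbis.floor_count v.mem g.f := by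
      simp only [vacc, voff]
      exact hobj.i32 176 (by decide)
    have erc : stb_vorbis.residue_count s_1164c2r.mem g.f = stb_vorbis.residue_count v.mem g.f := by
      simp only [vacc, voff]
      exact hobj.i32 320 (by decide)
    unfold Mapping.SubmapOK at hold ⊢
    rw [ef, er, efc, erc]
    exact hold
  have hin : InR12 u₀ g Vorbis.L.start_decoder.cut307 i j A7 A7c Ai A s_1164c2r :=
    { loop := hl'
      rbx := by
        rw [emap, w_kept.get .rbx rfl]
        exact c_rbx
      cur := hcur'
      r13 := by
        rw [w_kept.get .r13 rfl]
        exact c_r13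
      j_le := by
        rw [emap, e_sub]
        omega
      done := hdone }
  refine ReachVia.done ⟨A7, A7c, Ai, A, hin, ?_, ?_, ?_⟩
  · -- `j < submaps` still
    rw [emap, e_sub]
    exact hjlt
  · -- r12 = j (`movsxd r12, r13d`, callee-saved over get_bits)
    exact w_r12
  · -- r15 = m + 11H + j (`lea r15, [rbx + r12 + 11H]`, callee-saved over get_bits)
    rw [emap, w_r15]
    apply UInt64.toNat_inj.mp
    rw [toNat_addr _ (by omega)]
    u_omega

end Vorbis.Spec.start_decoder_R12c

/-- The unit `start_decoder.R12c`: `segR12c_walk` at every entry state. -/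
theorem Vorbis.Spec.Worked.start_decoder_R12c_ok : Vorbis.Spec.start_decoder_R12c.Statement := by
  intro Lay hLay μ hμ u₀ hcode h_get_bits h_store1 g i j v hat
  obtain ⟨A7, A7c, Ai, A, hb⟩ := hat
  exact Vorbis.Spec.start_decoder_R12c.segR12c_walk hLay hμ hcode h_get_bits h_store1 hb
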